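-- pv_equiv track=rewrite | github.com/arnaldojr/computacionalthinking | convert.py | convert_structure
-- ===== SOURCE A (Python) =====
-- def convert_structure(exercise_choice):
--     # Dividir o texto original em linhas e remover linhas em branco
--     lines = [line.strip() for line in exercise_choice.split("\n") if line.strip()]
--
--     # Encontrar a linha que contém a pergunta
--     question_line = ""
--     for i, line in enumerate(lines):
--         if line.startswith("!!! exercise choice"):
--             # A pergunta está na linha seguinte
--             question_line = lines[i + 1].strip()
--             break
--
--     # Iniciar o novo formato com a tag de abertura e a pergunta
--     new_structure = "<?quiz?>\n\n"
--     new_structure += f"question: {question_line}\n"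
--
--     # Extrair e reorganizar as respostas
--     for line in lines:
--         if line.startswith("- [x]"):
--             # Resposta correta
--             answer_correct = line.split("[x] ")[1].strip()
--             new_structure += f"answer-correct: {answer_correct}\n"
--         elif line.startswith("- [ ]"):
--             # Respostas incorretas
--             answer = line.split("[ ] ")[1].strip()
--             new_structure += f"answer: {answer}\n"
--
--     # Adicionar o conteúdo da resposta
--     for i, line in enumerate(lines):
--         if line.startswith("!!! answer"):
--             answer_content = lines[i + 1].strip()
--             new_structure += f"content:\n{answer_content}\n"
--             break
--
--     # Fechar a tag do quiz
--     new_structure += "<?/quiz?>"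
--
--     return new_structure
-- ===== SOURCE B (Python) =====
-- def convert_structure(exercise_choice):
--     # One pass over the cleaned lines collecting question/answers/content,
--     # then assemble the quiz with a single join.
--     lines = [line.strip() for line in exercise_choice.split("\n") if line.strip()]
--     question = None
--     content = None
--     answers = []
--     for i, line in enumerate(lines):
--         if line.startswith("!!! exercise choice") and question is None:
--             question = lines[i + 1].strip()
--         if line.startswith("- [x]"):
--             answers.append("answer-correct: " + line.split("[x] ")[1].strip())
--         elif line.startswith("- [ ]"):
--             answers.append("answer: " + line.split("[ ] ")[1].strip())
--         if line.startswith("!!! answer") and content is None: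
--             content = lines[i + 1].strip()
--     parts = ["<?quiz?>", "", "question: " + (question if question is not None else "")]
--     parts += answers
--     if content is not None:
--         parts.append("content:\n" + content)
--     parts.append("<?/quiz?>")
--     return "\n".join(parts)
-- ===== Notes on version B (the rewrite author's own statement) =====
-- stated objective: alternative
-- what changed: A's three separate scans over the cleaned lines (find-question-with-break, answers accumulation by string concatenation, find-content-with-break) are fused into one enumerate pass collecting question/answers/content, and the output is assembled at the end with a single newline join over a parts list.
-- outside the precondition, e.g. on convert_structure('!!! exercise choice'): A raises IndexError, B raises IndexError; on convert_structure('!!! answer'): A raises IndexError, B raises IndexError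
import Mathlib
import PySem

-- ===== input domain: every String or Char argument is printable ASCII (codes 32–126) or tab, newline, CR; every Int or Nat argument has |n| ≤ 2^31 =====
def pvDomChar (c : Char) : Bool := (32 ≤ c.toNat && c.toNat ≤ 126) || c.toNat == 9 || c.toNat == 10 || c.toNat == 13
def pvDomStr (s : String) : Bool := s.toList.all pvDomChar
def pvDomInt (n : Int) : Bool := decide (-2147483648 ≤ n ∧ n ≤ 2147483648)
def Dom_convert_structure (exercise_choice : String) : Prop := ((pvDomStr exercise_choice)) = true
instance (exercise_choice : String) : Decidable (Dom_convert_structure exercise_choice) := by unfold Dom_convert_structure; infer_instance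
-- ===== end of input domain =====

-- B replaces A's three scans over the lines by one fused pass collecting question/answers/content,
-- assembled at the end with a single join (objective: alternative decomposition, same cost).

-- shared helper: the cleaned-lines comprehension both Pythons start with
def pvCleanLines (s : String) : List String :=
  (((PySem.Str.split? s "\n").getD []).map PySem.Str.strip).filter (fun l => l != "")

-- shared helper: line.split(sep)[1].strip()  (the [1] is Python indexing; outside Pre_ Python raises, getD "" here)
def pvSplitSecond (l sep : String) : String :=
  PySem.Str.strip ((PySem.List.pyGet? ((PySem.Str.split? l sep).getD []) (1 : Int)).getD "")

-- ===== PORT A =====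
-- A's 'for i, line in enumerate(lines): if line.startswith(marker): take lines[i+1].strip(); break'
def pvFindNext (lines : List String) (marker : String) : List (Int × String) → Option String
  | [] => none
  | (i, l) :: rest =>
    if PySem.Str.startswith l marker then
      some (PySem.Str.strip ((PySem.List.pyGet? lines (i + 1)).getD ""))
    else pvFindNext lines marker rest

def convert_structure (exercise_choice : String) : String :=
  let lines := pvCleanLines exercise_choice
  let question_line := (pvFindNext lines "!!! exercise choice" (PySem.List.enumerate lines)).getD ""
  let ns1 := "<?quiz?>\n\n" ++ ("question: " ++ question_line ++ "\n")
  let ns2 := lines.foldl (fun acc l =>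
      if PySem.Str.startswith l "- [x]" then acc ++ ("answer-correct: " ++ pvSplitSecond l "[x] " ++ "\n")
      else if PySem.Str.startswith l "- [ ]" then acc ++ ("answer: " ++ pvSplitSecond l "[ ] " ++ "\n")
      else acc) ns1
  let ns3 := match pvFindNext lines "!!! answer" (PySem.List.enumerate lines) with
    | some c => ns2 ++ ("content:\n" ++ c ++ "\n")
    | none => ns2
  ns3 ++ "<?/quiz?>"

-- ===== PORT B =====
-- one step of B's fused loop, split componentwise: the first-marker-wins option update …
def pvStepFind (lines : List String) (marker : String) (q : Option String) (p : Int × String) : Option String :=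
  if PySem.Str.startswith p.2 marker && q.isNone then
    some (PySem.Str.strip ((PySem.List.pyGet? lines (p.1 + 1)).getD ""))
  else q

-- … and the answers-list update
def pvStepA (ans : List String) (p : Int × String) : List String :=
  if PySem.Str.startswith p.2 "- [x]" then ans ++ ["answer-correct: " ++ pvSplitSecond p.2 "[x] "]
  else if PySem.Str.startswith p.2 "- [ ]" then ans ++ ["answer: " ++ pvSplitSecond p.2 "[ ] "]
  else ans

def pvScan (lines : List String) (st : Option String × List String × Option String) (p : Int × String) :
    Option String × List String × Option String :=
  (pvStepFind lines "!!! exercise choice" st.1 p, pvStepA st.2.1 p, pvStepFind lines "!!! answer" st.2.2 p)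

def convert_structure_alt (exercise_choice : String) : String :=
  let lines := pvCleanLines exercise_choice
  let st := (PySem.List.enumerate lines).foldl (pvScan lines) (none, [], none)
  let parts := ["<?quiz?>", "", "question: " ++ st.1.getD ""] ++ st.2.1
      ++ (match st.2.2 with | some c => ["content:\n" ++ c] | none => []) ++ ["<?/quiz?>"]
  PySem.Str.join "\n" parts

-- ===== PRECONDITION & SPEC =====
-- Pre_ excludes exactly the inputs where A raises IndexError: a first '!!! exercise choice' or
-- '!!! answer' marker on the last nonblank line (lines[i+1]), or an answer line whose split has no [1].
def Pre_convert_structure (exercise_choice : String) : Prop :=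
  let lines := pvCleanLines exercise_choice
  ((lines.findIdx? (fun l => PySem.Str.startswith l "!!! exercise choice")).all
      (fun i => decide (i + 1 < lines.length)) = true)
  ∧ ((lines.findIdx? (fun l => PySem.Str.startswith l "!!! answer")).all
      (fun i => decide (i + 1 < lines.length)) = true)
  ∧ (∀ l ∈ lines,
      (PySem.Str.startswith l "- [x]" = true → 2 ≤ ((PySem.Str.split? l "[x] ").getD []).length)
      ∧ (PySem.Str.startswith l "- [ ]" = true → 2 ≤ ((PySem.Str.split? l "[ ] ").getD []).length))

instance (exercise_choice : String) : Decidable (Pre_convert_structure exercise_choice) := by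
  unfold Pre_convert_structure; infer_instance

def pvWitness_convert_structure : String :=
  "!!! exercise choice\nWhat is 2+2?\n- [x] 4\n- [ ] 5\n!!! answer\nBecause."

def Spec_convert_structure (exercise_choice : String) (out : String) : Prop := out = convert_structure_alt exercise_choice
instance (exercise_choice : String) (out : String) : Decidable (Spec_convert_structure exercise_choice out) := by unfold Spec_convert_structure; infer_instance

-- ===== CLAIM (what is proved, stated in full; the proofs are below) =====
def Claim_equal_convert_structure : Prop := ∀ (exercise_choice : String), Dom_convert_structure exercise_choice → Pre_convert_structure exercise_choice → Spec_convert_structure exercise_choice (convert_structure exercise_choice)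

-- ===== LEMMAS AND PROOFS =====

-- proof-side helpers: the answer lines produced by a list of lines, and their "each ++ newline" concatenation
def pvAnsList : List String → List String
  | [] => []
  | l :: rest =>
    if PySem.Str.startswith l "- [x]" then ("answer-correct: " ++ pvSplitSecond l "[x] ") :: pvAnsList rest
    else if PySem.Str.startswith l "- [ ]" then ("answer: " ++ pvSplitSecond l "[ ] ") :: pvAnsList rest
    else pvAnsList rest

-- B's fused fold is the triple of its three componentwise folds
theorem pvScan_split (lines : List String) (ps : List (Int × String))
    (q : Option String) (a : List String) (c : Option String) :
    ps.foldl (pvScan lines) (q, a, c)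
      = (ps.foldl (pvStepFind lines "!!! exercise choice") q,
         ps.foldl pvStepA a,
         ps.foldl (pvStepFind lines "!!! answer") c) := by
  induction ps generalizing q a c with
  | nil => rfl
  | cons p ps ih => simp [List.foldl, pvScan, ih]

-- the first-marker-wins fold is A's find-with-break
theorem pvStepFind_fold (lines : List String) (marker : String) (ps : List (Int × String))
    (q : Option String) :
    ps.foldl (pvStepFind lines marker) q = q.or (pvFindNext lines marker ps) := by
  induction ps generalizing q with
  | nil => cases q <;> rfl
  | cons p ps ih =>
    obtain ⟨i, l⟩ := p
    simp only [List.foldl, pvFindNext, pvStepFind]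
    cases hq : q with
    | some x => simp [ih]
    | none =>
      by_cases h : PySem.Str.startswith l marker = true <;>
        simp only [PySem.Str.startswith_eq] at h <;> simp [h, ih]

-- the answers fold appends pvAnsList, independent of the indices
theorem pvStepA_fold (ps : List (Int × String)) (a : List String) :
    ps.foldl pvStepA a = a ++ pvAnsList (ps.map (·.2)) := by
  induction ps generalizing a with
  | nil => simp [pvAnsList]
  | cons p ps ih =>
    simp only [List.foldl, List.map, pvStepA, pvAnsList]
    by_cases h1 : PySem.Chars.startswith p.2.toList ['-', ' ', '[', 'x', ']'] = true
    · simp [h1, ih]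
    · by_cases h2 : PySem.Chars.startswith p.2.toList ['-', ' ', '[', ' ', ']'] = true <;>
        simp [h1, h2, ih]

-- A's answers string-fold factors through pvAnsList as well
theorem pvAnsStr_fold (lines : List String) (init : String) :
    lines.foldl (fun acc l =>
      if PySem.Str.startswith l "- [x]" then acc ++ ("answer-correct: " ++ pvSplitSecond l "[x] " ++ "\n")
      else if PySem.Str.startswith l "- [ ]" then acc ++ ("answer: " ++ pvSplitSecond l "[ ] " ++ "\n")
      else acc) init
    = init ++ String.ofList (((pvAnsList lines).map (fun x => x.toList ++ "\n".toList)).flatten) := by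
  induction lines generalizing init with
  | nil =>
    rw [← String.toList_inj]
    simp [pvAnsList]
  | cons l rest ih =>
    simp only [List.foldl, pvAnsList]
    by_cases h1 : PySem.Str.startswith l "- [x]" = true
    · rw [if_pos h1, if_pos h1, ih, ← String.toList_inj]
      simp
    · by_cases h2 : PySem.Str.startswith l "- [ ]" = true
      · rw [if_neg h1, if_neg h1, if_pos h2, if_pos h2, ih, ← String.toList_inj]
        simp
      · rw [if_neg h1, if_neg h1, if_neg h2, if_neg h2, ih]

-- join "\n" over a nonempty tail, chars level
theorem pvJoin_append (ans rest : List (List Char)) (hr : rest ≠ []) :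
    PySem.Chars.join "\n".toList (ans ++ rest)
      = (ans.map (· ++ "\n".toList)).flatten ++ PySem.Chars.join "\n".toList rest := by
  induction ans with
  | nil => simp
  | cons a ans ih =>
    rcases hab : ans ++ rest with _ | ⟨b, t⟩
    · rcases List.append_eq_nil_iff.mp hab with ⟨-, h⟩; exact absurd h hr
    · simp only [List.cons_append, hab, PySem.Chars.join_cons_cons, List.map, List.flatten]
      rw [← hab, ih]
      simp [List.append_assoc]

-- the two assembled outputs agree for equal components
theorem pvAssemble (q : String) (ans : List String) (copt : Option String) :
    PySem.Str.join "\n" (["<?quiz?>", "", "question: " ++ q] ++ ans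
        ++ (match copt with | some c => ["content:\n" ++ c] | none => []) ++ ["<?/quiz?>"])
      = (match copt with
          | some c => ("<?quiz?>\n\n" ++ ("question: " ++ q ++ "\n") ++ String.ofList ((ans.map (fun x => x.toList ++ "\n".toList)).flatten)) ++ ("content:\n" ++ c ++ "\n")
          | none => "<?quiz?>\n\n" ++ ("question: " ++ q ++ "\n") ++ String.ofList ((ans.map (fun x => x.toList ++ "\n".toList)).flatten)) ++ "<?/quiz?>" := by
  cases copt with
  | none =>
    rw [← String.toList_inj]
    simp only [PySem.Str.toList_join, List.map_append, List.map, List.append_nil]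
    rw [pvJoin_append _ _ (by simp), PySem.Chars.join_singleton]
    simp [List.append_assoc, List.flatten, Function.comp_def]
  | some c =>
    rw [← String.toList_inj]
    simp only [PySem.Str.toList_join, List.map_append, List.map]
    rw [pvJoin_append _ _ (by simp), PySem.Chars.join_singleton]
    simp [List.append_assoc, List.flatten, Function.comp_def]

theorem pv_main (s : String) : convert_structure s = convert_structure_alt s := by
  simp only [convert_structure, convert_structure_alt, pvScan_split, pvStepFind_fold,
    Option.none_or, pvStepA_fold, List.nil_append, PySem.List.map_snd_enumerate,
    pvAssemble, pvAnsStr_fold]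

-- ===== VERDICT (by name: the statement is the Claim_ definition above) =====
theorem convert_structure_spec : Claim_equal_convert_structure := by
  intro s _ _
  unfold Spec_convert_structure
  exact pv_main s
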